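-- pv_equiv track=rewrite | github.com/LifeJiggy/Awesome-Grok-Skills | agents/reverse-engineering/agent.py | _addr_to_section
-- ===== SOURCE A (Python) =====
-- def _addr_to_section(address: int) -> str:
--     """Map address to section"""
--     sections = {
--         (0x401000, 0x401fff): '.text',
--         (0x402000, 0x402fff): '.rodata',
--         (0x600000, 0x600fff): '.data'
--     }
--
--     for (start, end), name in sections.items():
--         if start <= address <= end:
--             return name
--     return 'unknown'
-- ===== SOURCE B (Python) =====
-- def _addr_to_section(address: int) -> str:
--     """Map address to section"""
--     # each section is exactly one 0x1000-aligned page, so the page index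
--     # (address >> 12) identifies the section with a single dict lookup
--     return {0x401: '.text', 0x402: '.rodata', 0x600: '.data'}.get(address >> 12, 'unknown')
-- ===== Notes on version B (the rewrite author's own statement) =====
-- stated objective: simpler
-- what changed: Replaces the loop over (start,end) range tuples with a single keyed lookup of the page index (address shifted right by twelve bits), valid because each range is exactly one page-aligned page.
import Mathlib
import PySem

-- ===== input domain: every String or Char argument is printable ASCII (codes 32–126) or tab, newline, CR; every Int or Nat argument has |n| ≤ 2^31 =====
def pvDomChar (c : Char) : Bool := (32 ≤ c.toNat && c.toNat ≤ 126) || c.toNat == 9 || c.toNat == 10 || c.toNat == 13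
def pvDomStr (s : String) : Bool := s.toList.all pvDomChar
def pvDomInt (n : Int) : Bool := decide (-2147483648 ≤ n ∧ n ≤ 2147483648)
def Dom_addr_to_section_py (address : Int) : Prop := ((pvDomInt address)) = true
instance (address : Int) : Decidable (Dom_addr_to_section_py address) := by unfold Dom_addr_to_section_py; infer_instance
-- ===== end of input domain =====

-- B replaces A's loop over (start,end) range tuples with a single dict lookup keyed by the page index, address shifted right by twelve bits (simpler).


-- ===== PORT A =====
-- loop over the dict's items, returning the first name whose range contains address; else 'unknown'
def addr_to_section_py (address : Int) : String :=
  let sections : List ((Int × Int) × String) :=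
    [((0x401000, 0x401fff), ".text"), ((0x402000, 0x402fff), ".rodata"), ((0x600000, 0x600fff), ".data")]
  match sections.find? (fun p => decide (p.1.1 ≤ address) && decide (address ≤ p.1.2)) with
  | some p => p.2
  | none => "unknown"

-- ===== PORT B =====
-- Python's right shift by twelve bits is exactly floor division by 4096 (also for negatives): PySem.Int.floordiv
def addr_to_section_py_alt (address : Int) : String :=
  PySem.Dict.getD (PySem.Dict.mk [((0x401 : Int), ".text"), (0x402, ".rodata"), (0x600, ".data")])
    (PySem.Int.floordiv address 4096) "unknown"

-- ===== PRECONDITION & SPEC =====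
def Spec_addr_to_section_py (address : Int) (out : String) : Prop := out = addr_to_section_py_alt address
instance (address : Int) (out : String) : Decidable (Spec_addr_to_section_py address out) := by unfold Spec_addr_to_section_py; infer_instance

-- ===== CLAIM (what is proved, stated in full; the proofs are below) =====
def Claim_equal_addr_to_section_py : Prop := ∀ (address : Int), Dom_addr_to_section_py address → Spec_addr_to_section_py address (addr_to_section_py address)

-- ===== LEMMAS AND PROOFS =====

-- the page index equals q exactly when address lies in q's 0x1000-sized page
theorem page_eq_iff (a q : Int) :
    PySem.Int.floordiv a 4096 = q ↔ q * 4096 ≤ a ∧ a < (q + 1) * 4096 :=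
  PySem.Int.floordiv_eq_iff_of_pos (by norm_num)

-- ===== VERDICT (by name: the statement is the Claim_ definition above) =====
theorem addr_to_section_py_spec : Claim_equal_addr_to_section_py := by
  intro a _
  unfold Spec_addr_to_section_py addr_to_section_py addr_to_section_py_alt
  by_cases h1 : PySem.Int.floordiv a 4096 = 0x401
  · have hb := (page_eq_iff a 0x401).mp h1
    rw [h1]
    simp [List.find?, PySem.Dict.getD, PySem.Dict.get?, show (0x401000:Int) ≤ a by omega,
      show a ≤ (0x401fff:Int) by omega]
  by_cases h2 : PySem.Int.floordiv a 4096 = 0x402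
  · have hb := (page_eq_iff a 0x402).mp h2
    rw [h2]
    simp [List.find?, PySem.Dict.getD, PySem.Dict.get?, show ¬a ≤ (0x401fff:Int) by omega,
      show (0x402000:Int) ≤ a by omega, show a ≤ (0x402fff:Int) by omega]
  by_cases h3 : PySem.Int.floordiv a 4096 = 0x600
  · have hb := (page_eq_iff a 0x600).mp h3
    rw [h3]
    simp [List.find?, PySem.Dict.getD, PySem.Dict.get?, show ¬a ≤ (0x401fff:Int) by omega,
      show ¬a ≤ (0x402fff:Int) by omega,
      show (0x600000:Int) ≤ a by omega, show a ≤ (0x600fff:Int) by omega]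
  · have n1 : ¬((0x401000:Int) ≤ a ∧ a ≤ 0x401fff) := fun hc =>
      h1 ((page_eq_iff a 0x401).mpr (by omega))
    have n2 : ¬((0x402000:Int) ≤ a ∧ a ≤ 0x402fff) := fun hc =>
      h2 ((page_eq_iff a 0x402).mpr (by omega))
    have n3 : ¬((0x600000:Int) ≤ a ∧ a ≤ 0x600fff) := fun hc =>
      h3 ((page_eq_iff a 0x600).mpr (by omega))
    rw [PySem.Int.floordiv_eq_ediv_of_pos (by norm_num)] at h1 h2 h3
    have b1 : (decide ((0x401000:Int) ≤ a) && decide (a ≤ 0x401fff)) = false := by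
      simp only [Bool.and_eq_false_iff, decide_eq_false_iff_not]; omega
    have b2 : (decide ((0x402000:Int) ≤ a) && decide (a ≤ 0x402fff)) = false := by
      simp only [Bool.and_eq_false_iff, decide_eq_false_iff_not]; omega
    have b3 : (decide ((0x600000:Int) ≤ a) && decide (a ≤ 0x600fff)) = false := by
      simp only [Bool.and_eq_false_iff, decide_eq_false_iff_not]; omega
    have c1 : ((0x401:Int) == a / 4096) = false := beq_eq_false_iff_ne.mpr (fun h => h1 h.symm)
    have c2 : ((0x402:Int) == a / 4096) = false := beq_eq_false_iff_ne.mpr (fun h => h2 h.symm)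
    have c3 : ((0x600:Int) == a / 4096) = false := beq_eq_false_iff_ne.mpr (fun h => h3 h.symm)
    simp [List.find?, PySem.Dict.getD, PySem.Dict.get?, b1, b2, b3, c1, c2, c3]
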